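-- pv_equiv track=rewrite | github.com/GodInAllHisGlory/WordleHelper | helper.py | letters_not_known
-- ===== SOURCE A (Python) =====
-- def letters_not_known(potential_words, letters):
--     letter_list = letters.split(" ")
--     buffer_list = []
--     for letter in letter_list:
--         for word in potential_words:
--             if letter in word and word not in buffer_list:
--                 buffer_list.append(word)
--     return buffer_list
-- ===== SOURCE B (Python) =====
-- def letters_not_known(potential_words, letters):
--     letter_list = letters.split(" ")
--     buckets = [[] for _ in letter_list]
--     seen = set()
--     for word in potential_words:
--         if word in seen:
--             continue
--         for i, letter in enumerate(letter_list):
--             if letter in word: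
--                 buckets[i].append(word)
--                 seen.add(word)
--                 break
--     out = []
--     for bucket in buckets:
--         out += bucket
--     return out
-- ===== Notes on version B (the rewrite author's own statement) =====
-- stated objective: alternative
-- what changed: Replaces the letter-then-word nested loops with the linear 'word not in buffer_list' scan by a single pass over the words that routes each unseen word into the bucket of its first matching letter (seen tracked in a set), concatenating the buckets at the end.
import Mathlib
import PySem

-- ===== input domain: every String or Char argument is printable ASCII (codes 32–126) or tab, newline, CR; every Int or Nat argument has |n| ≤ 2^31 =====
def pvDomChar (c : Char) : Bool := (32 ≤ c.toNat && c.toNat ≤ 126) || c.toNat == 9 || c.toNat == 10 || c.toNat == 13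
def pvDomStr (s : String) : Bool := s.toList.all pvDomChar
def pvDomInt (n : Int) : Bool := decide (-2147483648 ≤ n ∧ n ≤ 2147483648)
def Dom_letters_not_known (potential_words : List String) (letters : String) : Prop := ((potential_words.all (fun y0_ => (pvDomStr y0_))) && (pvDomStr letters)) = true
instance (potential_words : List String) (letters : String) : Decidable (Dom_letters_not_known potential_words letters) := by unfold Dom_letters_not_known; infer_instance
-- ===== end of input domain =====

-- B replaces A's nested letter-then-word loops (with a linear 'not in buffer_list' scan)
-- by one pass over the words that buckets each unseen word under its first matching letter.

-- ===== PORT A =====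
def letters_not_known (potential_words : List String) (letters : String) : List String :=
  let letter_list := (PySem.Str.split? letters " ").getD []   -- sep " " ≠ "", so split? is always some
  letter_list.foldl (fun buffer_list letter =>
    potential_words.foldl (fun buffer_list word =>
      if PySem.Str.isIn letter word && !(buffer_list.contains word) then buffer_list ++ [word]
      else buffer_list) buffer_list) []

-- ===== PORT B =====
-- buckets[i].append(word)
def pvAppendAt : List (List String) → Nat → String → List (List String)
  | [], _, _ => []
  | b :: bs, 0, w => (b ++ [w]) :: bs
  | b :: bs, Nat.succ i, w => b :: pvAppendAt bs i w

def letters_not_known_alt (potential_words : List String) (letters : String) : List String :=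
  let letter_list := (PySem.Str.split? letters " ").getD []   -- sep " " ≠ "", so split? is always some
  let st := potential_words.foldl (fun (st : List (List String) × PySem.Set String) word =>
      if PySem.Set.contains st.2 word then st
      else
        match letter_list.findIdx? (fun letter => PySem.Str.isIn letter word) with
        | some i => (pvAppendAt st.1 i word, PySem.Set.add st.2 word)
        | none => st)
    (letter_list.map (fun _ => []), PySem.Set.empty)
  st.1.flatten

-- ===== PRECONDITION & SPEC =====
def Spec_letters_not_known (potential_words : List String) (letters : String) (out : List String) : Prop := out = letters_not_known_alt potential_words letters
instance (potential_words : List String) (letters : String) (out : List String) : Decidable (Spec_letters_not_known potential_words letters out) := by unfold Spec_letters_not_known; infer_instance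

-- ===== CLAIM (what is proved, stated in full; the proofs are below) =====
def Claim_equal_letters_not_known : Prop := ∀ (potential_words : List String) (letters : String), Dom_letters_not_known potential_words letters → Spec_letters_not_known potential_words letters (letters_not_known potential_words letters)

-- ===== LEMMAS AND PROOFS =====

def pvDdp : List String → List String
  | [] => []
  | w :: t => w :: pvDdp (t.filter (fun x => x != w))
termination_by ws => ws.length
decreasing_by
  simp only [List.length_unattach]
  exact Nat.lt_succ_of_le (le_trans (List.length_filter_le _ _) (le_of_eq List.length_attach))

def pvPick (l : String) : List String → List String → List String
  | _, [] => []
  | b, w :: t =>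
    if PySem.Str.isIn l w && !(b.contains w) then w :: pvPick l (b ++ [w]) t
    else pvPick l b t

def pvS : List String → List String → List String
  | [], _ => []
  | l :: ls, ws =>
    pvDdp (ws.filter (fun w => PySem.Str.isIn l w)) ++
      pvS ls (ws.filter (fun w => !(PySem.Str.isIn l w)))

def pvS' : List String → List String → List String
  | [], _ => []
  | l :: ls, ws =>
    ws.filter (fun w => PySem.Str.isIn l w) ++
      pvS' ls (ws.filter (fun w => !(PySem.Str.isIn l w)))

def pvFIdx (ls : List String) (w : String) : Option Nat :=
  ls.findIdx? (fun l => PySem.Str.isIn l w)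

def pvBstep (ls : List String) (st : List (List String) × PySem.Set String) (w : String) :
    List (List String) × PySem.Set String :=
  if PySem.Set.contains st.2 w then st
  else
    match pvFIdx ls w with
    | some i => (pvAppendAt st.1 i w, PySem.Set.add st.2 w)
    | none => st

def pvRoute (ls : List String) (bks : List (List String)) (ws : List String) : List (List String) :=
  ws.foldl (fun bks w => match pvFIdx ls w with | some i => pvAppendAt bks i w | none => bks) bks

theorem pvDdp_mem (x : String) : ∀ ws : List String, (x ∈ pvDdp ws ↔ x ∈ ws) := by
  intro ws
  induction hn : ws.length using Nat.strong_induction_on generalizing ws with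
  | _ n ih =>
  match ws with
  | [] => simp [pvDdp]
  | w :: t =>
    rw [pvDdp.eq_2]
    by_cases hx : x = w
    · simp [hx]
    · rw [List.mem_cons, List.mem_cons,
        ih (t.filter (fun y => y != w)).length (by subst hn; exact Nat.lt_succ_of_le (List.length_filter_le _ _)) _ rfl,
        List.mem_filter]
      simp [hx]

theorem pvDdp_filter (p : String → Bool) : ∀ ws : List String, (pvDdp ws).filter p = pvDdp (ws.filter p) := by
  intro ws
  induction hn : ws.length using Nat.strong_induction_on generalizing ws with
  | _ n ih =>
  match ws with
  | [] => simp [pvDdp]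
  | w :: t =>
    rw [pvDdp.eq_2]
    by_cases hp : p w
    · rw [List.filter_cons_of_pos hp, ih (t.filter (fun x => x != w)).length (by subst hn; exact Nat.lt_succ_of_le (List.length_filter_le _ _)) _ rfl]
      rw [List.filter_cons_of_pos hp, pvDdp.eq_2]
      congr 1
      rw [List.filter_filter, List.filter_filter]
      exact congrArg pvDdp (List.filter_congr (fun x _ => by rw [Bool.and_comm]))
    · rw [List.filter_cons_of_neg hp, ih (t.filter (fun x => x != w)).length (by subst hn; exact Nat.lt_succ_of_le (List.length_filter_le _ _)) _ rfl]
      rw [List.filter_cons_of_neg hp]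
      rw [List.filter_filter]
      refine congrArg pvDdp (List.filter_congr (fun x _ => ?_))
      by_cases hpx : p x
      · simp [hpx]; intro h; rw [h] at hpx; exact hp hpx
      · simp [hpx]

theorem pvDdp_nodup : ∀ ws : List String, (pvDdp ws).Nodup := by
  intro ws
  induction hn : ws.length using Nat.strong_induction_on generalizing ws with
  | _ n ih =>
  match ws with
  | [] => simp [pvDdp]
  | w :: t =>
    rw [pvDdp.eq_2]
    refine List.Nodup.cons (fun h => ?_)
      (ih (t.filter (fun x => x != w)).length (by subst hn; exact Nat.lt_succ_of_le (List.length_filter_le _ _)) _ rfl)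
    rw [pvDdp_mem, List.mem_filter] at h
    simp at h

theorem pvA_inner (l : String) : ∀ (t : List String) (b : List String),
    t.foldl (fun buffer_list word =>
      if PySem.Str.isIn l word && !(buffer_list.contains word) then buffer_list ++ [word]
      else buffer_list) b = b ++ pvPick l b t := by
  intro t
  induction t with
  | nil => simp [pvPick]
  | cons w t ih =>
    intro b
    simp only [List.foldl_cons, pvPick]
    by_cases h : (PySem.Str.isIn l w && !(b.contains w)) = true
    · rw [if_pos h, if_pos h, ih, List.append_assoc]; rfl
    · rw [if_neg h, if_neg h, ih]

theorem pvA_pick (l : String) : ∀ (t : List String) (b : List String),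
    pvPick l b t = pvDdp ((t.filter (fun w => !(b.contains w))).filter (fun w => PySem.Str.isIn l w)) := by
  intro t
  induction t with
  | nil => intro b; simp [pvPick, pvDdp]
  | cons w t ih =>
    intro b
    simp only [pvPick]
    by_cases hi : PySem.Str.isIn l w = true
    · by_cases hc : b.contains w = true
      · rw [if_neg (by simp only [hi, hc]; decide), ih,
          List.filter_cons_of_neg (by simp only [hc]; decide)]
      · have hc' : b.contains w = false := by simpa using hc
        rw [if_pos (by simp only [hi, hc']; decide), ih,
          List.filter_cons_of_pos (by simp only [hc']; decide),
          List.filter_cons_of_pos hi, pvDdp.eq_2]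
        refine congrArg (fun u => w :: u) ?_
        simp only [List.filter_filter]
        refine congrArg pvDdp (List.filter_congr (fun x _ => ?_))
        simp only [List.contains_append, List.contains_cons, List.contains_nil]
        cases hcx : b.contains x <;> cases hex : x == w <;> cases hix : PySem.Str.isIn l x <;>
          simp_all
    · have hi' : PySem.Str.isIn l w = false := by simpa using hi
      rw [if_neg (by simp only [hi', Bool.false_and]; exact Bool.false_ne_true), ih]
      by_cases hc : b.contains w = true
      · rw [List.filter_cons_of_neg (by simp only [hc]; decide)]
      · have hc' : b.contains w = false := by simpa using hc
        rw [List.filter_cons_of_pos (by simp only [hc']; decide),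
          List.filter_cons_of_neg (by simp only [hi']; decide)]

theorem pvA_outer (ws : List String) : ∀ (ls : List String) (b : List String),
    ls.foldl (fun buffer_list letter =>
      ws.foldl (fun buffer_list word =>
        if PySem.Str.isIn letter word && !(buffer_list.contains word) then buffer_list ++ [word]
        else buffer_list) buffer_list) b
    = b ++ pvS ls (ws.filter (fun w => !(b.contains w))) := by
  intro ls
  induction ls with
  | nil => intro b; simp [pvS]
  | cons l ls ih =>
    intro b
    simp only [List.foldl_cons, pvS]
    rw [pvA_inner, ih, List.append_assoc]
    refine congrArg (fun u => b ++ u) ?_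
    rw [pvA_pick]
    refine congrArg₂ (fun u v => u ++ pvS ls v) rfl ?_
    conv_rhs => rw [List.filter_filter]
    refine List.filter_congr (fun x hx => ?_)
    by_cases hxb : x ∈ b <;> by_cases hxi : PySem.Str.isIn l x = true <;>
      simp [List.contains_append, hxb, hxi, pvDdp_mem, List.mem_filter, hx] <;>
      simp_all [PySem.Str.isIn]

theorem pvS_eq_S' : ∀ (ls : List String) (ws : List String), pvS ls ws = pvS' ls (pvDdp ws) := by
  intro ls
  induction ls with
  | nil => intro ws; simp [pvS, pvS']
  | cons l ls ih =>
    intro ws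
    simp only [pvS, pvS']
    rw [pvDdp_filter, pvDdp_filter, ih]

theorem pvFIdx_cons (l : String) (ls : List String) (w : String) :
    pvFIdx (l :: ls) w = if PySem.Str.isIn l w then some 0 else (pvFIdx ls w).map (· + 1) := by
  simp [pvFIdx, List.findIdx?_cons]

theorem pvBstep_unmatched (ls : List String) (st : List (List String) × PySem.Set String)
    (w : String) (h : (pvFIdx ls w).isSome = false) : pvBstep ls st w = st := by
  unfold pvBstep
  cases hf : pvFIdx ls w with
  | some i => rw [hf] at h; simp at h
  | none => split <;> simp

theorem pvB_noop (ls : List String) : ∀ (ws : List String) (st : List (List String) × PySem.Set String),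
    ws.foldl (pvBstep ls) st = (ws.filter (fun w => (pvFIdx ls w).isSome)).foldl (pvBstep ls) st := by
  intro ws
  induction ws with
  | nil => intro st; rfl
  | cons w t ih =>
    intro st
    by_cases h : (pvFIdx ls w).isSome = true
    · simp only [List.filter_cons, h, if_true, List.foldl_cons]
      rw [ih]
    · have h' : (pvFIdx ls w).isSome = false := by simpa using h
      simp only [List.filter_cons, h', Bool.false_eq_true, if_false, List.foldl_cons]
      rw [pvBstep_unmatched ls st w h', ih]

theorem pvB_clean (ls : List String) : ∀ (u : List String) (bks : List (List String)) (seen : PySem.Set String),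
    (∀ w ∈ u, (pvFIdx ls w).isSome) →
    u.foldl (pvBstep ls) (bks, seen)
      = (pvDdp (u.filter (fun w => !(PySem.Set.contains seen w)))).foldl (pvBstep ls) (bks, seen) := by
  intro u
  induction u with
  | nil => intro bks seen _; simp [pvDdp]
  | cons w t ih =>
    intro bks seen hall
    by_cases hs : w ∈ seen
    · have hsc : PySem.Set.contains seen w = true := by simp [PySem.Set.contains, List.elem_eq_contains] at *; exact hs
      simp only [List.filter_cons, hsc, Bool.not_true, Bool.false_eq_true, if_false, List.foldl_cons]
      rw [show pvBstep ls (bks, seen) w = (bks, seen) from by unfold pvBstep; simp [hsc, hs]]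
      exact ih bks seen (fun x hx => hall x (List.mem_cons_of_mem _ hx))
    · have hsc : PySem.Set.contains seen w = false := by
        simpa [PySem.Set.contains] using hs
      have hadd : PySem.Set.add seen w = seen ++ [w] := by simp [PySem.Set.add, PySem.Set.contains, hs]
      cases hf : pvFIdx ls w with
      | none =>
        have := hall w List.mem_cons_self
        rw [hf] at this; simp at this
      | some i =>
        have hstep : pvBstep ls (bks, seen) w = (pvAppendAt bks i w, PySem.Set.add seen w) := by
          unfold pvBstep; simp [hsc, hs, hf]
        simp only [List.filter_cons, hsc, Bool.not_false, if_true, pvDdp.eq_2, List.foldl_cons]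
        rw [hstep, ih _ _ (fun x hx => hall x (List.mem_cons_of_mem _ hx))]
        congr 1
        rw [List.filter_filter]
        refine congrArg pvDdp (List.filter_congr (fun x _ => ?_))
        rw [hadd]
        cases hxs : PySem.Set.contains seen x <;> cases hxw : x == w <;>
          simp_all [PySem.Set.contains_eq_listContains, List.contains_append]

theorem pvB_pure (ls : List String) : ∀ (u : List String) (bks : List (List String)) (seen : PySem.Set String),
    u.Nodup → (∀ w ∈ u, ¬ w ∈ seen) →
    (u.foldl (pvBstep ls) (bks, seen)).1 = pvRoute ls bks u := by
  intro u
  induction u with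
  | nil => intro bks seen _ _; rfl
  | cons w t ih =>
    intro bks seen hnd hfresh
    have hs : ¬ w ∈ seen := hfresh w List.mem_cons_self
    have hsc : PySem.Set.contains seen w = false := by simpa [PySem.Set.contains] using hs
    rw [List.foldl_cons, pvRoute, List.foldl_cons, ← pvRoute]
    cases hf : pvFIdx ls w with
    | none =>
      rw [show pvBstep ls (bks, seen) w = (bks, seen) from by unfold pvBstep; simp [hsc, hs, hf]]
      exact ih bks seen hnd.of_cons (fun x hx => hfresh x (List.mem_cons_of_mem _ hx))
    | some i =>
      rw [show pvBstep ls (bks, seen) w = (pvAppendAt bks i w, PySem.Set.add seen w) from by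
        unfold pvBstep; simp [hsc, hs, hf]]
      refine ih _ _ hnd.of_cons (fun x hx => ?_)
      have hxw : x ≠ w := fun he => (List.nodup_cons.mp hnd).1 (he ▸ hx)
      have : PySem.Set.add seen w = seen ++ [w] := by simp [PySem.Set.add, PySem.Set.contains, hs]
      rw [this]
      simp [hxw, hfresh x (List.mem_cons_of_mem _ hx)]

theorem pvRoute_cons (l : String) (ls : List String) : ∀ (u : List String) (b0 : List String) (bks : List (List String)),
    pvRoute (l :: ls) (b0 :: bks) u
      = (b0 ++ u.filter (fun w => PySem.Str.isIn l w)) :: pvRoute ls bks (u.filter (fun w => !(PySem.Str.isIn l w))) := by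
  intro u
  induction u with
  | nil => intro b0 bks; simp [pvRoute]
  | cons w t ih =>
    intro b0 bks
    rw [pvRoute, List.foldl_cons, ← pvRoute]
    by_cases hi : PySem.Str.isIn l w = true
    · rw [show (match pvFIdx (l :: ls) w with | some i => pvAppendAt (b0 :: bks) i w | none => b0 :: bks)
          = (b0 ++ [w]) :: bks from by rw [pvFIdx_cons, if_pos hi]; rfl]
      rw [ih, List.filter_cons_of_pos hi,
        List.filter_cons_of_neg (by rw [hi]; decide), List.append_assoc, List.singleton_append]
    · have hi' : PySem.Str.isIn l w = false := by simpa using hi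
      rw [List.filter_cons_of_neg (by rw [hi']; decide), List.filter_cons_of_pos (by rw [hi']; decide)]
      rw [show (match pvFIdx (l :: ls) w with | some i => pvAppendAt (b0 :: bks) i w | none => b0 :: bks)
          = b0 :: (match pvFIdx ls w with | some i => pvAppendAt bks i w | none => bks) from by
        rw [pvFIdx_cons, if_neg (by rw [hi']; decide)]
        cases pvFIdx ls w <;> rfl]
      rw [ih]
      conv_rhs => rw [pvRoute, List.foldl_cons, ← pvRoute]

theorem pvRoute_nil : ∀ (u : List String) (bks : List (List String)), pvRoute [] bks u = bks := by
  intro u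
  induction u with
  | nil => intro bks; rfl
  | cons w t ih =>
    intro bks
    rw [pvRoute, List.foldl_cons, ← pvRoute, show pvFIdx [] w = none from rfl]
    exact ih bks

theorem pvB_flat : ∀ (ls : List String) (u : List String),
    (pvRoute ls (ls.map (fun _ => [])) u).flatten = pvS' ls u := by
  intro ls
  induction ls with
  | nil => intro u; rw [pvRoute_nil]; rfl
  | cons l ls ih =>
    intro u
    rw [List.map_cons, pvRoute_cons, List.flatten_cons, ih]
    simp [pvS']

theorem pvS'_noop : ∀ (ls : List String) (u : List String),
    pvS' ls u = pvS' ls (u.filter (fun w => (pvFIdx ls w).isSome)) := by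
  intro ls
  induction ls with
  | nil => intro u; rfl
  | cons l ls ih =>
    intro u
    simp only [pvS']
    refine congrArg₂ (· ++ ·) ?_ ?_
    · conv_rhs => rw [List.filter_filter]
      refine (List.filter_congr (fun x _ => ?_)).symm
      cases hx : PySem.Str.isIn l x
      · simp [hx]
      · rw [pvFIdx_cons, if_pos hx]; simp [hx]
    · rw [ih (u.filter (fun w => !(PySem.Str.isIn l w)))]
      refine congrArg (pvS' ls) ?_
      rw [List.filter_filter, List.filter_filter]
      refine List.filter_congr (fun x _ => ?_)
      cases hx : PySem.Str.isIn l x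
      · rw [pvFIdx_cons, if_neg (by rw [hx]; decide)]
        simp [hx, Option.isSome_map]
      · rw [pvFIdx_cons, if_pos hx]
        simp [hx]

theorem pvA_eq (ws : List String) (ls : List String) :
    ls.foldl (fun buffer_list letter =>
      ws.foldl (fun buffer_list word =>
        if PySem.Str.isIn letter word && !(buffer_list.contains word) then buffer_list ++ [word]
        else buffer_list) buffer_list) [] = pvS' ls (pvDdp ws) := by
  rw [pvA_outer ws ls [], show ws.filter (fun w => !(([] : List String).contains w)) = ws from by simp,
    pvS_eq_S', List.nil_append]

theorem pvB_eq (ws : List String) (ls : List String) :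
    ((ws.foldl (pvBstep ls) (ls.map (fun _ => []), PySem.Set.empty)).1).flatten = pvS' ls (pvDdp ws) := by
  rw [pvB_noop,
    pvB_clean ls _ _ _ (fun w hw => (List.mem_filter.mp hw).2),
    show (ws.filter (fun w => (pvFIdx ls w).isSome)).filter
        (fun w => !(PySem.Set.contains (PySem.Set.empty) w)) = ws.filter (fun w => (pvFIdx ls w).isSome) from by
      simp [PySem.Set.empty, PySem.Set.contains],
    pvB_pure ls _ _ _ (pvDdp_nodup _) (fun x _ => by simp [PySem.Set.empty]),
    pvB_flat, ← pvDdp_filter]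
  exact (pvS'_noop ls (pvDdp ws)).symm

-- ===== VERDICT (by name: the statement is the Claim_ definition above) =====
theorem letters_not_known_spec : Claim_equal_letters_not_known := by
  intro ws letters _
  show letters_not_known ws letters = letters_not_known_alt ws letters
  unfold letters_not_known letters_not_known_alt
  rw [pvA_eq, ← pvB_eq]
  rfl
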